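-- pv_equiv track=rewrite | github.com/k-harada/AtCoder | ARC/ARC108/B.py | solve
-- ===== SOURCE A (Python) =====
-- def solve(n, s):
--     fox_list = []
--     res = 0
--     for t in s:
--         if t == 'f':
--             fox_list.append('f')
--         elif t == 'o' and len(fox_list) > 0:
--             last = fox_list.pop()
--             if last == 'f':
--                 fox_list.append('fo')
--             else:
--                 fox_list = []
--         elif t == 'x' and len(fox_list) > 0:
--             last = fox_list.pop()
--             if last == 'fo':
--                 res += 1
--             else:
--                 fox_list = []
--         else:
--             fox_list = []
--     return n - 3 * res
-- ===== SOURCE B (Python) =====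
-- def solve(n, s):
--     start = len(s)
--     while 'fox' in s:
--         s = s.replace('fox', '')
--     return n - (start - len(s))
-- ===== Notes on version B (the rewrite author's own statement) =====
-- stated objective: simpler
-- what changed: Replaces the single-pass token-stack scan by repeated whole-string rewriting: while 'fox' occurs, delete all its occurrences with str.replace, then return n minus the total length removed ('fox' deletion is confluent, so the count matches the greedy stack).
import Mathlib
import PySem

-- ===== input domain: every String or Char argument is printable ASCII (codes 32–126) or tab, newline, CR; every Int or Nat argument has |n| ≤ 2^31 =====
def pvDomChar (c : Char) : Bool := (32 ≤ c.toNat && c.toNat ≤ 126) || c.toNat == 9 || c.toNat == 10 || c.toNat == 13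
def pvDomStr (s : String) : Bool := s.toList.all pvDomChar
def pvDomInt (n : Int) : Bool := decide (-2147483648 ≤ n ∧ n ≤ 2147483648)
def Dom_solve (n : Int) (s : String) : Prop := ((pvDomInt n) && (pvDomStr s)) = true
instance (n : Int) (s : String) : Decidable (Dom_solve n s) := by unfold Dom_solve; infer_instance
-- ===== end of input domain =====

-- B changes the algorithm: instead of A's one-pass token stack it repeatedly deletes all
-- occurrences of "fox" with str.replace until none remain (objective: simpler).

-- ===== PORT A =====
-- A's fox_list stack is kept top-first (Python append/pop at the end = cons/uncons here).
def solveStep (p : List String × Int) (t : Char) : List String × Int :=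
  let fox_list := p.1
  let res := p.2
  if t = 'f' then ("f" :: fox_list, res)
  else if t = 'o' ∧ fox_list.length > 0 then
    match fox_list with
    | last :: rest => if last = "f" then ("fo" :: rest, res) else ([], res)
    | [] => ([], res)
  else if t = 'x' ∧ fox_list.length > 0 then
    match fox_list with
    | last :: rest => if last = "fo" then (rest, res + 1) else ([], res)
    | [] => ([], res)
  else ([], res)

def solve (n : Int) (s : String) : Int :=
  let st := s.toList.foldl solveStep ([], 0)
  n - 3 * st.2

-- ===== PORT B =====
-- Termination fact for the while loop: each replace pass shortens the string.
theorem go_zero (l acc : List Char) :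
    PySem.Chars.replace.go ['f','o','x'] [] 0 l acc = acc.reverse ++ l := rfl

theorem go_nil (fuel : Nat) (acc : List Char) :
    PySem.Chars.replace.go ['f','o','x'] [] fuel [] acc = acc.reverse := by
  cases fuel with
  | zero => simp [go_zero]
  | succ n => rfl

theorem go_cons (fuel : Nat) (c : Char) (t acc : List Char) :
    PySem.Chars.replace.go ['f','o','x'] [] (fuel+1) (c::t) acc =
      if List.isPrefixOf ['f','o','x'] (c::t) then
        PySem.Chars.replace.go ['f','o','x'] [] fuel (List.drop 2 t) acc
      else PySem.Chars.replace.go ['f','o','x'] [] fuel t (c::acc) := by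
  rw [PySem.Chars.replace.go]
  split <;> rfl

theorem go_length_le (fuel : Nat) : ∀ (l acc : List Char), l.length ≤ fuel →
    (PySem.Chars.replace.go ['f','o','x'] [] fuel l acc).length ≤ acc.length + l.length := by
  induction fuel with
  | zero =>
    intro l acc h
    have : l = [] := List.eq_nil_of_length_eq_zero (Nat.le_zero.mp h)
    subst this
    simp [go_zero]
  | succ fuel ih =>
    intro l acc h
    match l with
    | [] => simp [go_nil]
    | c :: t =>
      rw [go_cons]
      by_cases hp : List.isPrefixOf ['f','o','x'] (c :: t) = true
      · simp only [hp, if_true]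
        have := ih (List.drop 2 t) acc
          (by simp only [List.length_drop, List.length_cons] at h ⊢; omega)
        simp only [List.length_drop, List.length_cons] at this h ⊢
        omega
      · simp only [Bool.not_eq_true] at hp
        simp only [hp, Bool.false_eq_true, if_false]
        have := ih t (c :: acc) (by simp only [List.length_cons] at h ⊢; omega)
        simp only [List.length_cons] at this ⊢
        omega

theorem go_length_lt (fuel : Nat) : ∀ (l acc : List Char), l.length ≤ fuel →
    ['f','o','x'] <:+: l →
    (PySem.Chars.replace.go ['f','o','x'] [] fuel l acc).length + 3 ≤ acc.length + l.length := by
  induction fuel with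
  | zero =>
    intro l acc h hinf
    have : l = [] := List.eq_nil_of_length_eq_zero (Nat.le_zero.mp h)
    subst this
    simp at hinf
  | succ fuel ih =>
    intro l acc h hinf
    match l with
    | [] => simp at hinf
    | c :: t =>
      rw [go_cons]
      by_cases hp : List.isPrefixOf ['f','o','x'] (c :: t) = true
      · simp only [hp, if_true]
        have h3 := (List.isPrefixOf_iff_prefix.mp hp).length_le
        have := go_length_le fuel (List.drop 2 t) acc
          (by simp only [List.length_drop, List.length_cons] at h ⊢; omega)
        simp only [List.length_drop, List.length_cons] at this h h3 ⊢
        omega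
      · have hinf' : ['f','o','x'] <:+: t := by
          rcases (List.infix_cons_iff).mp hinf with hpre | hi
          · exact absurd (List.isPrefixOf_iff_prefix.mpr hpre) hp
          · exact hi
        simp only [Bool.not_eq_true] at hp
        simp only [hp, Bool.false_eq_true, if_false]
        have := ih t (c :: acc) (by simp only [List.length_cons] at h ⊢; omega) hinf'
        simp only [List.length_cons] at this ⊢
        omega

theorem replace_fox_length_lt (l : List Char) (h : PySem.Chars.isIn ['f','o','x'] l = true) :
    (PySem.Chars.replace l ['f','o','x'] []).length < l.length := by
  have hinf : ['f','o','x'] <:+: l := (PySem.Chars.isIn_iff_infix _ _).mp h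
  rw [PySem.Chars.replace]
  simp only [List.isEmpty_iff, reduceCtorEq, if_false]
  have := go_length_lt l.length l [] le_rfl hinf
  simp at this
  omega

-- while 'fox' in s: s = s.replace('fox', '')   (on the code-point list, as PySem defines Str ops)
def bLoop (l : List Char) : List Char :=
  if h : PySem.Chars.isIn ['f','o','x'] l = true then
    bLoop (PySem.Chars.replace l ['f','o','x'] [])
  else l
termination_by l.length
decreasing_by exact replace_fox_length_lt l h

def solve_alt (n : Int) (s : String) : Int :=
  let start : Int := (s.toList.length : Int)
  let final := bLoop s.toList
  n - (start - (final.length : Int))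

-- ===== PRECONDITION & SPEC =====
def Spec_solve (n : Int) (s : String) (out : Int) : Prop := out = solve_alt n s
instance (n : Int) (s : String) (out : Int) : Decidable (Spec_solve n s out) := by unfold Spec_solve; infer_instance

-- ===== CLAIM (what is proved, stated in full; the proofs are below) =====
def Claim_equal_solve : Prop := ∀ (n : Int) (s : String), Dom_solve n s → Spec_solve n s (solve n s)

-- ===== LEMMAS AND PROOFS =====

-- The common yardstick: a character stack (top first) that cancels a completed "fox".
def step (st : List Char) (c : Char) : List Char :=
  match st with
  | o :: f :: rest => if c = 'x' ∧ o = 'o' ∧ f = 'f' then rest else c :: st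
  | _ => c :: st

theorem step_ne_x (st : List Char) (c : Char) (h : c ≠ 'x') : step st c = c :: st := by
  rcases st with _ | ⟨a, _ | ⟨b, r⟩⟩ <;> simp [step, h]

theorem step_pop (r : List Char) : step ('o' :: 'f' :: r) 'x' = r := by
  simp [step]

theorem foldl_step_go (fuel : Nat) : ∀ (l acc st : List Char), l.length ≤ fuel →
    List.foldl step st (PySem.Chars.replace.go ['f','o','x'] [] fuel l acc) =
      List.foldl step (List.foldl step st acc.reverse) l := by
  induction fuel with
  | zero =>
    intro l acc st h
    have : l = [] := List.eq_nil_of_length_eq_zero (Nat.le_zero.mp h)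
    subst this
    simp [go_zero]
  | succ fuel ih =>
    intro l acc st h
    match l with
    | [] => simp [go_nil]
    | c :: t =>
      rw [go_cons]
      by_cases hp : List.isPrefixOf ['f','o','x'] (c :: t) = true
      · simp only [hp, if_true]
        obtain ⟨u, hu⟩ := List.isPrefixOf_iff_prefix.mp hp
        simp only [List.cons_append, List.nil_append, List.cons.injEq] at hu
        obtain ⟨rfl, rfl⟩ := hu
        have h2 : (List.drop 2 ('o' :: 'x' :: u)).length ≤ fuel := by
          simp only [List.length_cons] at h ⊢
          simp; omega
        rw [ih _ acc st h2]
        simp only [List.drop_succ_cons, List.drop_zero, List.foldl_cons]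
        rw [step_ne_x _ 'f' (by decide), step_ne_x _ 'o' (by decide), step_pop]
      · simp only [Bool.not_eq_true] at hp
        simp only [hp, Bool.false_eq_true, if_false]
        rw [ih t (c :: acc) st (by simp only [List.length_cons] at h ⊢; omega)]
        simp [List.foldl_append]

theorem foldl_step_replace (l : List Char) :
    List.foldl step [] (PySem.Chars.replace l ['f','o','x'] []) = List.foldl step [] l := by
  rw [PySem.Chars.replace]
  simp only [List.isEmpty_iff, reduceCtorEq, if_false]
  simpa using foldl_step_go l.length l [] [] le_rfl

theorem replay_no_fox : ∀ (l p : List Char), ¬ (['f','o','x'] <:+: (p ++ l)) →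
    List.foldl step p.reverse l = (p ++ l).reverse := by
  intro l
  induction l with
  | nil => intro p _; simp
  | cons c t ih =>
    intro p h
    have hpush : step p.reverse c = c :: p.reverse := by
      rcases hr : p.reverse with _ | ⟨a, _ | ⟨b, r⟩⟩
      · simp [step]
      · simp [step]
      · show step (a :: b :: r) c = c :: a :: b :: r
        by_cases hcond : c = 'x' ∧ a = 'o' ∧ b = 'f'
        · exfalso
          obtain ⟨rfl, rfl, rfl⟩ := hcond
          have hp : p = r.reverse ++ ['f', 'o'] := by
            have := congrArg List.reverse hr
            simpa using this
          apply h
          refine ⟨r.reverse, t, ?_⟩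
          simp [hp]
        · simp [step, hcond]
    have hassoc : p ++ c :: t = (p ++ [c]) ++ t := by simp
    have hrev : (p ++ [c]).reverse = c :: p.reverse := by simp
    calc List.foldl step p.reverse (c :: t)
        = List.foldl step (c :: p.reverse) t := by rw [List.foldl_cons, hpush]
      _ = List.foldl step (p ++ [c]).reverse t := by rw [hrev]
      _ = ((p ++ [c]) ++ t).reverse := ih (p ++ [c]) (by rw [← hassoc]; exact h)
      _ = (p ++ c :: t).reverse := by rw [← hassoc]

theorem bLoop_eq_stack (l : List Char) : bLoop l = (List.foldl step [] l).reverse := by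
  induction l using bLoop.induct with
  | case1 l h ih =>
    rw [bLoop, dif_pos h, ih, foldl_step_replace]
  | case2 l h =>
    rw [bLoop, dif_neg h]
    have hni : ¬ (['f','o','x'] <:+: l) := by
      rw [← PySem.Chars.isIn_iff_infix]
      simpa using h
    have := replay_no_fox l [] (by simpa using hni)
    simp only [List.reverse_nil, List.nil_append] at this
    rw [this, List.reverse_reverse]

-- A-side invariant: tokens encode the live top of the char stack, over a dead remainder.
def encTok (t : String) : List Char := if t = "fo" then ['o','f'] else ['f']

def DeadTop (d : List Char) : Prop :=
  match d with
  | [] => True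
  | c :: r => c ≠ 'f' ∧ (c = 'o' → r.head? ≠ some 'f')

theorem encTok_f : encTok "f" = ['f'] := rfl
theorem encTok_fo : encTok "fo" = ['o','f'] := rfl

theorem deadtop_head_ne_f (D : List Char) (hD : DeadTop D) : D.head? ≠ some 'f' := by
  match D, hD with
  | [], _ => simp
  | c :: r, hD => simp [hD.1]

theorem step_x_no_pop (a b : Char) (r : List Char) (h : ¬ (a = 'o' ∧ b = 'f')) :
    step (a :: b :: r) 'x' = 'x' :: a :: b :: r := by
  have hc : ¬ ('x' = 'x' ∧ a = 'o' ∧ b = 'f') := by tauto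
  show (if ('x' = 'x' ∧ a = 'o' ∧ b = 'f') then r else 'x' :: a :: b :: r) = _
  rw [if_neg hc]

theorem step_x_top_ne_o (a : Char) (ha : a ≠ 'o') (S : List Char) :
    step (a :: S) 'x' = 'x' :: a :: S := by
  rcases S with _ | ⟨b, r⟩
  · rfl
  · exact step_x_no_pop a b r (fun h => ha h.1)

theorem step_x_dead (D : List Char) (hD : DeadTop D) : step D 'x' = 'x' :: D := by
  match D, hD with
  | [], _ => rfl
  | [d], _ => rfl
  | d1 :: d2 :: r, hD =>
    exact step_x_no_pop d1 d2 r (fun h => (hD.2 h.1) (by rw [h.2]; rfl))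

theorem solveA_invariant (l : List Char) :
    ∃ D, List.foldl step [] l = (l.foldl solveStep ([], 0)).1.flatMap encTok ++ D ∧ DeadTop D ∧
      (∀ tok ∈ (l.foldl solveStep ([], 0)).1, tok = "f" ∨ tok = "fo") ∧
      3 * (l.foldl solveStep ([], 0)).2 = (l.length : Int) - ((List.foldl step [] l).length : Int) := by
  induction l using List.reverseRecOn with
  | nil => exact ⟨[], rfl, trivial, by simp, by simp⟩
  | append_singleton p c ih =>
    obtain ⟨D, hS, hD, hwf, hlen⟩ := ih
    simp only [List.foldl_append, List.foldl_cons, List.foldl_nil, List.length_append,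
      List.length_cons, List.length_nil] at *
    by_cases hf : c = 'f'
    · -- push "f"
      subst hf
      have hstep : step (List.foldl step [] p) 'f' = 'f' :: List.foldl step [] p :=
        step_ne_x _ _ (by decide)
      have hsolve : solveStep (p.foldl solveStep ([], 0)) 'f' =
          ("f" :: (p.foldl solveStep ([], 0)).1, (p.foldl solveStep ([], 0)).2) := by
        simp [solveStep]
      rw [hstep, hsolve]
      refine ⟨D, ?_, hD, ?_, ?_⟩
      · simp [hS, encTok_f]
      · intro tok htok
        rcases List.mem_cons.mp htok with rfl | h
        · left; rfl
        · exact hwf tok h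
      · simp only [List.length_cons]
        push_cast
        omega
    · by_cases ho : c = 'o'
      · subst ho
        have hstep : step (List.foldl step [] p) 'o' = 'o' :: List.foldl step [] p :=
          step_ne_x _ _ (by decide)
        rcases htk : (p.foldl solveStep ([], 0)).1 with _ | ⟨tok, rest⟩
        · -- stack empty: A clears, char stack stays dead
          have hsolve : solveStep (p.foldl solveStep ([], 0)) 'o' =
              ([], (p.foldl solveStep ([], 0)).2) := by
            simp [solveStep, htk]
          rw [hstep, hsolve]
          refine ⟨'o' :: List.foldl step [] p, by simp, ?_, by simp, ?_⟩
          · refine ⟨by decide, fun _ => ?_⟩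
            rw [hS, htk]
            simpa using deadtop_head_ne_f D hD
          · simp only [List.length_cons]; push_cast; omega
        · rcases hwf tok (htk ▸ List.mem_cons_self) with rfl | rfl
          · -- top token "f" becomes "fo"
            have hsolve : solveStep (p.foldl solveStep ([], 0)) 'o' =
                ("fo" :: rest, (p.foldl solveStep ([], 0)).2) := by
              simp [solveStep, htk]
            rw [hstep, hsolve]
            refine ⟨D, ?_, hD, ?_, ?_⟩
            · rw [hS, htk]
              simp [encTok_f, encTok_fo]
            · intro t ht
              rcases List.mem_cons.mp ht with rfl | h
              · right; rfl
              · exact hwf t (htk ▸ List.mem_cons_of_mem _ h)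
            · simp only [List.length_cons]; push_cast; omega
          · -- top token "fo": A clears; 'o' lands on the 'o' of "fo", dead
            have hsolve : solveStep (p.foldl solveStep ([], 0)) 'o' =
                ([], (p.foldl solveStep ([], 0)).2) := by
              simp [solveStep, htk]
            rw [hstep, hsolve]
            refine ⟨'o' :: List.foldl step [] p, by simp, ?_, by simp, ?_⟩
            · refine ⟨by decide, fun _ => ?_⟩
              rw [hS, htk]
              simp [encTok_fo]
            · simp only [List.length_cons]; push_cast; omega
      · by_cases hx : c = 'x'
        · subst hx
          rcases htk : (p.foldl solveStep ([], 0)).1 with _ | ⟨tok, rest⟩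
          · -- stack empty: A clears; char stack dead, no pop fires
            have hsolve : solveStep (p.foldl solveStep ([], 0)) 'x' =
                ([], (p.foldl solveStep ([], 0)).2) := by
              simp [solveStep, htk]
            have hstep : step (List.foldl step [] p) 'x' = 'x' :: List.foldl step [] p := by
              rw [hS, htk]
              simpa using step_x_dead D hD
            rw [hstep, hsolve]
            refine ⟨'x' :: List.foldl step [] p,
              by simp, ⟨by decide, fun hh => absurd hh (by decide)⟩, by simp, ?_⟩
            simp only [List.length_cons]; push_cast; omega
          · rcases hwf tok (htk ▸ List.mem_cons_self) with rfl | rfl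
            · -- top token "f": A clears; char stack top is 'f', no pop
              have hsolve : solveStep (p.foldl solveStep ([], 0)) 'x' =
                  ([], (p.foldl solveStep ([], 0)).2) := by
                simp [solveStep, htk]
              have hstep : step (List.foldl step [] p) 'x' = 'x' :: List.foldl step [] p := by
                rw [hS, htk]
                simp only [List.flatMap_cons, encTok_f, List.cons_append]
                exact step_x_top_ne_o 'f' (by decide) _
              rw [hstep, hsolve]
              refine ⟨'x' :: List.foldl step [] p,
                by simp, ⟨by decide, fun hh => absurd hh (by decide)⟩, by simp, ?_⟩
              simp only [List.length_cons]; push_cast; omega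
            · -- top token "fo" and 'x': a completed fox, both sides pop
              have hsolve : solveStep (p.foldl solveStep ([], 0)) 'x' =
                  (rest, (p.foldl solveStep ([], 0)).2 + 1) := by
                simp [solveStep, htk]
              have hstep : step (List.foldl step [] p) 'x' = rest.flatMap encTok ++ D := by
                rw [hS, htk]
                simp only [List.flatMap_cons, encTok_fo, List.cons_append, List.nil_append]
                exact step_pop _
              rw [hstep, hsolve]
              refine ⟨D, rfl, hD, ?_, ?_⟩
              · intro t ht
                exact hwf t (htk ▸ List.mem_cons_of_mem _ ht)
              · have hlenS : (List.foldl step [] p).length =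
                    (rest.flatMap encTok ++ D).length + 2 := by
                  rw [hS, htk]
                  simp [encTok_fo]
                push_cast
                omega
        · -- any other character: A clears; the char stack gains a dead head
          have hsolve : solveStep (p.foldl solveStep ([], 0)) c =
              ([], (p.foldl solveStep ([], 0)).2) := by
            simp [solveStep, hf, ho, hx]
          have hstep : step (List.foldl step [] p) c = c :: List.foldl step [] p :=
            step_ne_x _ _ hx
          rw [hstep, hsolve]
          refine ⟨c :: List.foldl step [] p, by simp, ⟨hf, fun h => absurd h ho⟩, by simp, ?_⟩
          simp only [List.length_cons]; push_cast; omega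

-- ===== VERDICT (by name: the statement is the Claim_ definition above) =====
theorem solve_spec : Claim_equal_solve := by
  intro n s _
  unfold Spec_solve solve solve_alt
  obtain ⟨D, _, _, _, hres⟩ := solveA_invariant s.toList
  rw [bLoop_eq_stack]
  simp only [List.length_reverse]
  omega
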